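-- pv_equiv track=rewrite | github.com/nirajandata/iwbootcamp-assignnments-2 | 10.py | cam_cases
-- ===== SOURCE A (Python) =====
-- def cam_cases(text,sep):
--     res = [text[0].lower()]
--     for c in text[1:]:
--         if c in ('ABCDEFGHIJKLMNOPQRSTUVWXYZ'):
--             res.append(sep)
--             res.append(c.lower())
--         else:
--             res.append(c)
--
--     return ''.join(res)
-- ===== SOURCE B (Python) =====
-- import re
--
-- def cam_cases(text, sep):
--     return text[0].lower() + re.sub('[A-Z]', lambda m: sep + m.group().lower(), text[1:])
-- ===== Notes on version B (the rewrite author's own statement) =====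
-- stated objective: idiomatic
-- what changed: Replaces the explicit char-by-char loop appending pieces to a result list with a single re.sub over text[1:] whose replacement function inserts sep plus the lowercased match; the first character is lowercased separately.
import Mathlib
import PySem

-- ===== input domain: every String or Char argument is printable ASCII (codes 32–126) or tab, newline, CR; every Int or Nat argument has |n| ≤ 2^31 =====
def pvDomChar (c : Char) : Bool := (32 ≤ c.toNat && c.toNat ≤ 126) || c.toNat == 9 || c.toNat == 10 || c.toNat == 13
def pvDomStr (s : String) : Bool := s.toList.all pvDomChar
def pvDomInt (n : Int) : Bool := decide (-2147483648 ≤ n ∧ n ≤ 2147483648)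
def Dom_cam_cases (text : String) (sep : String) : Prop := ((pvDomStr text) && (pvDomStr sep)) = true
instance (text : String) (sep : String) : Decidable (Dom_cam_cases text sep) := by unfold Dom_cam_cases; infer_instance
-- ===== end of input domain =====

-- B replaces A's explicit accumulator loop with a regex-style rewrite of the tail (each uppercase letter ↦ sep + its lowercase), first char handled separately; objective: idiomatic.

-- ===== PORT A =====
-- A builds a list of string pieces: [text[0].lower()], then for each c of text[1:]
-- appends sep and c.lower() if c is an ASCII uppercase letter, else c; joins at the end.
def cam_cases (text : String) (sep : String) : String :=
  match text.toList with
  | [] => ""  -- Python raises IndexError on text[0] here; excluded by Pre_cam_cases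
  | c :: rest =>
    let res : List (List Char) := [PySem.Chars.lower [c]]
    let res := rest.foldl (fun res ch =>
      if "ABCDEFGHIJKLMNOPQRSTUVWXYZ".toList.contains ch then
        (res ++ [sep.toList]) ++ [PySem.Chars.lower [ch]]
      else res ++ [[ch]]) res
    String.ofList res.flatten  -- ''.join(res)

-- ===== PORT B =====
-- B: text[0].lower() + re.sub('[A-Z]', lambda m: sep + m.group().lower(), text[1:]).
-- The regex pass is ported by hand (exact: [A-Z] matches single chars in the codepoint
-- range 'A'..'Z'; the replacement function inserts sep literally plus the lowercased match).
def cam_cases_alt (text : String) (sep : String) : String :=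
  match text.toList with
  | [] => ""  -- Python raises IndexError on text[0] here; excluded by Pre_cam_cases
  | c :: rest =>
    String.ofList (PySem.Chars.lower [c] ++
      rest.flatMap (fun ch =>
        if ('A' ≤ ch && ch ≤ 'Z') then sep.toList ++ PySem.Chars.lower [ch] else [ch]))

-- ===== PRECONDITION & SPEC =====
-- Pre_ excludes only the empty string, on which A (text[0]) raises IndexError.
def Pre_cam_cases (text : String) (sep : String) : Prop := text ≠ ""
instance (text : String) (sep : String) : Decidable (Pre_cam_cases text sep) := by unfold Pre_cam_cases; infer_instance
def pvWitness_cam_cases : String × String := ("helloWorldFooBAR", "_")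

def Spec_cam_cases (text : String) (sep : String) (out : String) : Prop := out = cam_cases_alt text sep
instance (text : String) (sep : String) (out : String) : Decidable (Spec_cam_cases text sep out) := by unfold Spec_cam_cases; infer_instance

-- ===== CLAIM (what is proved, stated in full; the proofs are below) =====
def Claim_equal_cam_cases : Prop := ∀ (text : String) (sep : String), Dom_cam_cases text sep → Pre_cam_cases text sep → Spec_cam_cases text sep (cam_cases text sep)

-- ===== LEMMAS AND PROOFS =====
theorem char_eq_iff_toNat (c d : Char) : c = d ↔ c.toNat = d.toNat :=
  ⟨fun h => h ▸ rfl, fun h => Char.ext (UInt32.toNat_inj.mp h)⟩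

theorem char_le_iff_toNat (c d : Char) : c ≤ d ↔ c.toNat ≤ d.toNat := by
  simp [Char.le_def, UInt32.le_iff_toNat_le]

-- A's membership test in the 26-letter string equals B's codepoint-range test, for every Char.
set_option maxRecDepth 8192 in
theorem upper_iff (c : Char) :
    ("ABCDEFGHIJKLMNOPQRSTUVWXYZ".toList.contains c) = ('A' ≤ c && c ≤ 'Z') := by
  have hl : "ABCDEFGHIJKLMNOPQRSTUVWXYZ".toList = ['A','B','C','D','E','F','G','H','I','J','K','L','M','N','O','P','Q','R','S','T','U','V','W','X','Y','Z'] := rfl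
  rw [hl, Bool.eq_iff_iff]
  simp only [List.contains, List.elem_eq_mem, List.mem_cons, List.not_mem_nil, or_false,
    char_eq_iff_toNat, char_le_iff_toNat, Bool.and_eq_true, decide_eq_true_eq]
  simp only [Char.reduceToNat]
  omega

theorem flatten_flatMap' (l : List Char) (g : Char → List (List Char)) :
    (l.flatMap g).flatten = l.flatMap (fun c => (g c).flatten) := by
  induction l with
  | nil => rfl
  | cons x xs ih => simp [List.flatMap_cons, List.flatten_append, ih]

-- ===== VERDICT (by name: the statement is the Claim_ definition above) =====
theorem cam_cases_spec : Claim_equal_cam_cases := by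
  intro text sep _ hpre
  unfold Spec_cam_cases cam_cases cam_cases_alt
  cases h : text.toList with
  | nil => exact absurd (String.ext h) hpre
  | cons c rest =>
    simp only
    have hstep : (fun (res : List (List Char)) ch =>
        if "ABCDEFGHIJKLMNOPQRSTUVWXYZ".toList.contains ch then
          (res ++ [sep.toList]) ++ [PySem.Chars.lower [ch]]
        else res ++ [[ch]])
      = (fun (res : List (List Char)) ch =>
          res ++ (if ('A' ≤ ch && ch ≤ 'Z') then [sep.toList, PySem.Chars.lower [ch]] else [[ch]])) := by
      funext res ch
      rw [upper_iff]
      split <;> simp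
    rw [hstep, PySem.List.foldl_append_eq_flatMap]
    simp only [List.singleton_append, List.flatten_cons, flatten_flatMap']
    congr 1
    congr 1
    apply List.flatMap_congr
    intro ch _
    split <;> simp
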